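-- pv_equiv track=rewrite | github.com/cream68/heizlast_typ_c | heizlast_typ_c/interpolation.py | get_bounding_box_1d
-- ===== SOURCE A (Python) =====
-- def get_bounding_box_1d(x, factors_dict):
--     """
--     Returns the bounding keys and values for 1D interpolation from a dict.
--
--     Parameters:
--     - x: The query value.
--     - factors_dict: Dictionary with scalar keys and corresponding values.
--
--     Returns:
--     - x1, x2: Bounding keys (can be equal if x is outside range).
--     - y1, y2: Corresponding values from the dictionary.
--     """
--     keys = sorted(factors_dict.keys())
--
--     # Clamp left
--     if x <= keys[0]:
--         x1 = x2 = keys[0]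
--     # Clamp right
--     elif x >= keys[-1]:
--         x1 = x2 = keys[-1]
--     # Interpolation range
--     else:
--         x1 = max(k for k in keys if k <= x)
--         x2 = min(k for k in keys if k >= x and k != x1)
--
--     y1 = factors_dict[x1]
--     y2 = factors_dict[x2]
--
--     return x1, x2, y1, y2
-- ===== SOURCE B (Python) =====
-- def get_bounding_box_1d(x, factors_dict):
--     """Single linear pass over the dict items tracking min, max, best
--     predecessor (largest key <= x) and best successor (smallest key > x);
--     no sorting."""
--     it = iter(factors_dict.items())
--     k0, v0 = next(it)
--     kmin, vmin = k0, v0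
--     kmax, vmax = k0, v0
--     x1 = y1 = x2 = y2 = None
--     for k, v in factors_dict.items():
--         if k < kmin:
--             kmin, vmin = k, v
--         if k > kmax:
--             kmax, vmax = k, v
--         if k <= x and (x1 is None or k > x1):
--             x1, y1 = k, v
--         if k > x and (x2 is None or k < x2):
--             x2, y2 = k, v
--     if x <= kmin:
--         return kmin, kmin, vmin, vmin
--     if x >= kmax:
--         return kmax, kmax, vmax, vmax
--     return x1, x2, y1, y2
-- ===== Notes on version B (the rewrite author's own statement) =====
-- stated objective: faster
-- what changed: Replaces A's sort of all keys plus two generator scans by a single linear pass over the dict items that tracks the minimum, maximum, largest key <= x and smallest key > x together with their values.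
import Mathlib
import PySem

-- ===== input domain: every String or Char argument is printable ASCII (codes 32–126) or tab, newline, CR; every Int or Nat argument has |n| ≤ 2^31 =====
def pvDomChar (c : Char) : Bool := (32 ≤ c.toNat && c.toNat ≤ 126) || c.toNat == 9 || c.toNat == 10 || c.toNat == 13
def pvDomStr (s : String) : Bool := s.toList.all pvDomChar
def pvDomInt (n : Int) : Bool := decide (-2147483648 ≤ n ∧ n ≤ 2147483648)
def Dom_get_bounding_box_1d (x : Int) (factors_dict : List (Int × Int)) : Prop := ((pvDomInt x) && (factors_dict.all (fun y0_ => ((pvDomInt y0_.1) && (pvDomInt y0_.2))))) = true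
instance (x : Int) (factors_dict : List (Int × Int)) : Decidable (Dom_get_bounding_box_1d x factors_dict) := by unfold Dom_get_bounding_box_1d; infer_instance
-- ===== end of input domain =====

-- B replaces A's sort + two generator scans by one linear pass over the dict items
-- tracking min, max, predecessor (largest key ≤ x) and successor (smallest key > x).

-- ===== PORT A =====
def get_bounding_box_1d (x : Int) (factors_dict : List (Int × Int)) : Int × Int × Int × Int :=
  let d := PySem.Dict.ofList factors_dict
  let keys := PySem.List.sorted d.keys (fun k => k) false
  -- keys[0] / keys[-1]: pyGet? = none exactly where Python raises IndexError (empty dict, excluded by Pre_)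
  let first := (PySem.List.pyGet? keys 0).getD 0
  let last := (PySem.List.pyGet? keys (-1)).getD 0
  let p :=
    if x ≤ first then (first, first)
    else if last ≤ x then (last, last)
    else
      -- max(k for k in keys if k <= x); min(k for k in keys if k >= x and k != x1)
      -- the generators are nonempty in this branch, so the .getD 0 defaults are never taken
      let x1 := (PySem.List.max? (keys.filter (fun k => decide (k ≤ x))) (fun k => k)).getD 0
      let x2 := (PySem.List.min? (keys.filter (fun k => decide (x ≤ k) && decide (k ≠ x1))) (fun k => k)).getD 0
      (x1, x2)
  (p.1, p.2, d.getD p.1 0, d.getD p.2 0)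

-- ===== PORT B =====
-- one step of B's loop body (the four ifs, in order)
def bbStep (x : Int) (st : (Int × Int) × (Int × Int) × Option (Int × Int) × Option (Int × Int))
    (kv : Int × Int) : (Int × Int) × (Int × Int) × Option (Int × Int) × Option (Int × Int) :=
  let mn := if kv.1 < st.1.1 then kv else st.1
  let mx := if st.2.1.1 < kv.1 then kv else st.2.1
  let op := if kv.1 ≤ x then
      (match st.2.2.1 with
       | none => some kv
       | some p => if p.1 < kv.1 then some kv else some p)
    else st.2.2.1
  let os := if x < kv.1 then
      (match st.2.2.2 with
       | none => some kv
       | some q => if kv.1 < q.1 then some kv else some q)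
    else st.2.2.2
  (mn, mx, op, os)

def get_bounding_box_1d_alt (x : Int) (factors_dict : List (Int × Int)) : Int × Int × Int × Int :=
  let items := (PySem.Dict.ofList factors_dict).items
  match items with
  | [] => (0, 0, 0, 0)  -- Python: next(it) raises StopIteration (empty dict, excluded by Pre_)
  | kv0 :: _ =>
    let s := items.foldl (bbStep x) (kv0, kv0, none, none)
    if x ≤ s.1.1 then (s.1.1, s.1.1, s.1.2, s.1.2)
    else if s.2.1.1 ≤ x then (s.2.1.1, s.2.1.1, s.2.1.2, s.2.1.2)
    else
      match s.2.2.1, s.2.2.2 with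
      | some p, some q => (p.1, q.1, p.2, q.2)
      | _, _ => (0, 0, 0, 0)  -- unreachable for interior x (a predecessor and a successor exist)

-- ===== PRECONDITION & SPEC =====
-- Pre_ excludes only the empty dict, on which Python A raises IndexError (keys[0]).
def Pre_get_bounding_box_1d (x : Int) (factors_dict : List (Int × Int)) : Prop := factors_dict ≠ []
instance (x : Int) (factors_dict : List (Int × Int)) : Decidable (Pre_get_bounding_box_1d x factors_dict) := by unfold Pre_get_bounding_box_1d; infer_instance

def pvWitness_get_bounding_box_1d : Int × (List (Int × Int)) := (1, [(0, 5), (2, 7)])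

def Spec_get_bounding_box_1d (x : Int) (factors_dict : List (Int × Int)) (out : Int × Int × Int × Int) : Prop := out = get_bounding_box_1d_alt x factors_dict
instance (x : Int) (factors_dict : List (Int × Int)) (out : Int × Int × Int × Int) : Decidable (Spec_get_bounding_box_1d x factors_dict out) := by unfold Spec_get_bounding_box_1d; infer_instance

-- ===== CLAIM (what is proved, stated in full; the proofs are below) =====
def Claim_equal_get_bounding_box_1d : Prop := ∀ (x : Int) (factors_dict : List (Int × Int)), Dom_get_bounding_box_1d x factors_dict → Pre_get_bounding_box_1d x factors_dict → Spec_get_bounding_box_1d x factors_dict (get_bounding_box_1d x factors_dict)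

-- ===== LEMMAS AND PROOFS =====

-- invariant of B's loop state after processing `seen`, having been seeded with `base`
def InvMin (base : Int × Int) (seen : List (Int × Int)) (mn : Int × Int) : Prop :=
  mn ∈ base :: seen ∧ ∀ p ∈ base :: seen, mn.1 ≤ p.1
def InvMax (base : Int × Int) (seen : List (Int × Int)) (mx : Int × Int) : Prop :=
  mx ∈ base :: seen ∧ ∀ p ∈ base :: seen, p.1 ≤ mx.1
def InvPred (x : Int) (seen : List (Int × Int)) (op : Option (Int × Int)) : Prop :=
  match op with
  | none => ∀ p ∈ seen, ¬ p.1 ≤ x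
  | some p => p ∈ seen ∧ p.1 ≤ x ∧ ∀ q ∈ seen, q.1 ≤ x → q.1 ≤ p.1
def InvSucc (x : Int) (seen : List (Int × Int)) (os : Option (Int × Int)) : Prop :=
  match os with
  | none => ∀ p ∈ seen, ¬ x < p.1
  | some q => q ∈ seen ∧ x < q.1 ∧ ∀ p ∈ seen, x < p.1 → q.1 ≤ p.1
def BInv (x : Int) (base : Int × Int) (seen : List (Int × Int))
    (st : (Int × Int) × (Int × Int) × Option (Int × Int) × Option (Int × Int)) : Prop :=
  InvMin base seen st.1 ∧ InvMax base seen st.2.1 ∧ InvPred x seen st.2.2.1 ∧ InvSucc x seen st.2.2.2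

theorem mem_cons_snoc_iff (base kv : Int × Int) (seen : List (Int × Int)) (p : Int × Int) :
    p ∈ base :: (seen ++ [kv]) ↔ (p ∈ base :: seen ∨ p = kv) := by
  simp [List.mem_cons, List.mem_append, or_assoc]

theorem inv_step (x : Int) (base kv : Int × Int) (seen : List (Int × Int)) (st)
    (h : BInv x base seen st) : BInv x base (seen ++ [kv]) (bbStep x st kv) := by
  obtain ⟨mn, mx, op, os⟩ := st
  obtain ⟨⟨hmn, hmnle⟩, ⟨hmx, hmxle⟩, hop, hos⟩ := h
  refine ⟨?_, ?_, ?_, ?_⟩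
  · -- InvMin
    simp only [bbStep, InvMin]
    split_ifs with hlt
    · refine ⟨(mem_cons_snoc_iff _ _ _ _).mpr (Or.inr rfl), ?_⟩
      intro p hp
      rcases (mem_cons_snoc_iff _ _ _ _).mp hp with h1 | h1
      · exact le_trans (le_of_lt hlt) (hmnle p h1)
      · simp [h1]
    · refine ⟨(mem_cons_snoc_iff _ _ _ _).mpr (Or.inl hmn), ?_⟩
      intro p hp
      rcases (mem_cons_snoc_iff _ _ _ _).mp hp with h1 | h1
      · exact hmnle p h1
      · rw [h1]; exact not_lt.mp hlt
  · -- InvMax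
    simp only [bbStep, InvMax]
    split_ifs with hlt
    · refine ⟨(mem_cons_snoc_iff _ _ _ _).mpr (Or.inr rfl), ?_⟩
      intro p hp
      rcases (mem_cons_snoc_iff _ _ _ _).mp hp with h1 | h1
      · exact le_trans (hmxle p h1) (le_of_lt hlt)
      · simp [h1]
    · refine ⟨(mem_cons_snoc_iff _ _ _ _).mpr (Or.inl hmx), ?_⟩
      intro p hp
      rcases (mem_cons_snoc_iff _ _ _ _).mp hp with h1 | h1
      · exact hmxle p h1
      · rw [h1]; exact not_lt.mp hlt
  · -- InvPred
    simp only [bbStep]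
    split_ifs with hle
    · cases op with
      | none =>
        simp only [InvPred] at hop ⊢
        refine ⟨by simp, hle, ?_⟩
        intro q hq hqx
        rcases List.mem_append.mp hq with h1 | h1
        · exact absurd hqx (hop q h1)
        · simp only [List.mem_singleton] at h1; simp [h1]
      | some p =>
        simp only [InvPred] at hop
        obtain ⟨hpmem, hpx, hpmax⟩ := hop
        show InvPred x (seen ++ [kv]) (if p.1 < kv.1 then some kv else some p)
        split_ifs with hplt
        · simp only [InvPred]
          refine ⟨by simp, hle, ?_⟩
          intro q hq hqx
          rcases List.mem_append.mp hq with h1 | h1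
          · exact le_trans (hpmax q h1 hqx) (le_of_lt hplt)
          · simp only [List.mem_singleton] at h1; simp [h1]
        · simp only [InvPred]
          refine ⟨List.mem_append_left _ hpmem, hpx, ?_⟩
          intro q hq hqx
          rcases List.mem_append.mp hq with h1 | h1
          · exact hpmax q h1 hqx
          · simp only [List.mem_singleton] at h1; rw [h1]; exact not_lt.mp hplt
    · cases op with
      | none =>
        simp only [InvPred] at hop ⊢
        intro q hq
        rcases List.mem_append.mp hq with h1 | h1
        · exact hop q h1
        · simp only [List.mem_singleton] at h1; rw [h1]; exact hle
      | some p =>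
        simp only [InvPred] at hop ⊢
        obtain ⟨hpmem, hpx, hpmax⟩ := hop
        refine ⟨List.mem_append_left _ hpmem, hpx, ?_⟩
        intro q hq hqx
        rcases List.mem_append.mp hq with h1 | h1
        · exact hpmax q h1 hqx
        · simp only [List.mem_singleton] at h1; rw [h1] at hqx; exact absurd hqx hle
  · -- InvSucc
    simp only [bbStep]
    split_ifs with hlt
    · cases os with
      | none =>
        simp only [InvSucc] at hos ⊢
        refine ⟨by simp, hlt, ?_⟩
        intro q hq hqx
        rcases List.mem_append.mp hq with h1 | h1
        · exact absurd hqx (hos q h1)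
        · simp only [List.mem_singleton] at h1; simp [h1]
      | some p =>
        simp only [InvSucc] at hos
        obtain ⟨hpmem, hpx, hpmin⟩ := hos
        show InvSucc x (seen ++ [kv]) (if kv.1 < p.1 then some kv else some p)
        split_ifs with hplt
        · simp only [InvSucc]
          refine ⟨by simp, hlt, ?_⟩
          intro q hq hqx
          rcases List.mem_append.mp hq with h1 | h1
          · exact le_trans (le_of_lt hplt) (hpmin q h1 hqx)
          · simp only [List.mem_singleton] at h1; simp [h1]
        · simp only [InvSucc]
          refine ⟨List.mem_append_left _ hpmem, hpx, ?_⟩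
          intro q hq hqx
          rcases List.mem_append.mp hq with h1 | h1
          · exact hpmin q h1 hqx
          · simp only [List.mem_singleton] at h1; rw [h1]; exact not_lt.mp hplt
    · cases os with
      | none =>
        simp only [InvSucc] at hos ⊢
        intro q hq
        rcases List.mem_append.mp hq with h1 | h1
        · exact hos q h1
        · simp only [List.mem_singleton] at h1; rw [h1]; exact hlt
      | some p =>
        simp only [InvSucc] at hos ⊢
        obtain ⟨hpmem, hpx, hpmin⟩ := hos
        refine ⟨List.mem_append_left _ hpmem, hpx, ?_⟩
        intro q hq hqx
        rcases List.mem_append.mp hq with h1 | h1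
        · exact hpmin q h1 hqx
        · simp only [List.mem_singleton] at h1; rw [h1] at hqx; exact absurd hqx hlt

theorem pairwise_le_getLast (l : List Int) (h : l.Pairwise (· ≤ ·)) (hne : l ≠ []) :
    ∀ y ∈ l, y ≤ l.getLast hne := by
  induction l with
  | nil => exact absurd rfl hne
  | cons a t ih =>
    intro y hy
    cases t with
    | nil => simp at hy; simp [hy]
    | cons b t' =>
      rw [List.getLast_cons (List.cons_ne_nil b t')]
      rcases List.mem_cons.mp hy with h1 | h1
      · rw [h1]
        exact (List.pairwise_cons.mp h).1 _ (List.getLast_mem _)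
      · exact ih (List.pairwise_cons.mp h).2 (List.cons_ne_nil b t') y h1

theorem inv_foldl (x : Int) (base : Int × Int) (rest : List (Int × Int)) :
    ∀ (seen : List (Int × Int)) (st), BInv x base seen st →
      BInv x base (seen ++ rest) (rest.foldl (bbStep x) st) := by
  induction rest with
  | nil => intro seen st h; simpa using h
  | cons kv t ih =>
    intro seen st h
    have := ih (seen ++ [kv]) (bbStep x st kv) (inv_step x base kv seen st h)
    simpa using this

-- ===== VERDICT (by name: the statement is the Claim_ definition above) =====
theorem get_bounding_box_1d_spec : Claim_equal_get_bounding_box_1d := by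
  intro x l _ hpre
  unfold Spec_get_bounding_box_1d
  have hnd : (PySem.Dict.ofList l : PySem.Dict Int Int).keys.Nodup := PySem.Dict.nodup_keys_ofList l
  have hkeysdef : (PySem.Dict.ofList l : PySem.Dict Int Int).keys
      = (PySem.Dict.ofList l : PySem.Dict Int Int).items.map Prod.fst := rfl
  have hmemk : ∀ k : Int, k ∈ l.map Prod.fst → k ∈ (PySem.Dict.ofList l : PySem.Dict Int Int).keys := by
    intro k hk
    rw [show (PySem.Dict.ofList l : PySem.Dict Int Int)
          = l.foldl (fun d p => d.insert p.1 p.2) PySem.Dict.empty from rfl,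
        PySem.Dict.keys_foldl_insert_key]
    exact (PySem.Set.mem_update _ _ _).mpr (Or.inr hk)
  have hitne : (PySem.Dict.ofList l : PySem.Dict Int Int).items ≠ [] := by
    intro h0
    cases l with
    | nil => exact hpre rfl
    | cons a t =>
      have := hmemk a.1 (by simp)
      rw [hkeysdef, h0] at this
      simp at this
  obtain ⟨kv0, t, hit⟩ : ∃ kv0 t, (PySem.Dict.ofList l : PySem.Dict Int Int).items = kv0 :: t := by
    cases h : (PySem.Dict.ofList l : PySem.Dict Int Int).items with
    | nil => exact absurd h hitne
    | cons a b => exact ⟨a, b, rfl⟩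
  obtain ⟨k0, kt, hk⟩ : ∃ k0 kt,
      PySem.List.sorted (PySem.Dict.ofList l : PySem.Dict Int Int).keys (fun k : Int => k) false = k0 :: kt := by
    cases h : PySem.List.sorted (PySem.Dict.ofList l : PySem.Dict Int Int).keys (fun k : Int => k) false with
    | nil =>
      exfalso
      have hp := PySem.List.sorted_perm (PySem.Dict.ofList l : PySem.Dict Int Int).keys (fun k : Int => k) false
      rw [h] at hp
      have : (PySem.Dict.ofList l : PySem.Dict Int Int).keys = [] := hp.symm.eq_nil
      rw [hkeysdef, hit] at this
      simp at this
    | cons a b => exact ⟨a, b, rfl⟩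
  have hKne : (k0 :: kt : List Int) ≠ [] := List.cons_ne_nil _ _
  have hmemK : ∀ y : Int, y ∈ (k0 :: kt : List Int) ↔ y ∈ (PySem.Dict.ofList l : PySem.Dict Int Int).keys := by
    intro y
    rw [← hk]
    exact PySem.List.mem_sorted _ _ _ _
  have hmin : ∀ y ∈ (PySem.Dict.ofList l : PySem.Dict Int Int).keys, k0 ≤ y :=
    PySem.List.key_head_sorted_le _ (fun k : Int => k) hk
  have hpw : (k0 :: kt : List Int).Pairwise (· ≤ ·) := by
    have := PySem.List.sorted_pairwise (PySem.Dict.ofList l : PySem.Dict Int Int).keys (fun k : Int => k)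
    rw [hk] at this
    exact this
  have hmax : ∀ y ∈ (PySem.Dict.ofList l : PySem.Dict Int Int).keys, y ≤ (k0 :: kt).getLast hKne := by
    intro y hy
    exact pairwise_le_getLast _ hpw hKne y ((hmemK y).mpr hy)
  have hkey_iff : ∀ k : Int, k ∈ (PySem.Dict.ofList l : PySem.Dict Int Int).keys ↔
      ∃ v, (k, v) ∈ (PySem.Dict.ofList l : PySem.Dict Int Int).items := by
    intro k
    rw [hkeysdef]
    constructor
    · intro hk2
      obtain ⟨⟨a, b⟩, hp, rfl⟩ := List.mem_map.mp hk2
      exact ⟨b, hp⟩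
    · rintro ⟨v, hv⟩
      exact List.mem_map.mpr ⟨(k, v), hv, rfl⟩
  have hval : ∀ p : Int × Int, p ∈ (PySem.Dict.ofList l : PySem.Dict Int Int).items →
      (PySem.Dict.ofList l : PySem.Dict Int Int).getD p.1 0 = p.2 := by
    intro p hp
    obtain ⟨a, b⟩ := p
    exact PySem.Dict.getD_of_mem_items _ hp hnd 0
  -- B's loop invariant at the end of the pass
  have hinv := inv_foldl x kv0 (kv0 :: t) [] (kv0, kv0, none, none)
      (by refine ⟨⟨?_, ?_⟩, ⟨?_, ?_⟩, ?_, ?_⟩ <;> simp [InvPred, InvSucc])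
  rw [List.nil_append] at hinv
  obtain ⟨⟨hmnmem, hmnle⟩, ⟨hmxmem, hmxle⟩, hop, hos⟩ := hinv
  set s := (kv0 :: t).foldl (bbStep x) (kv0, kv0, none, none) with hs
  have hdup : ∀ p : Int × Int, p ∈ kv0 :: (kv0 :: t) ↔ p ∈ kv0 :: t := by
    intro p
    constructor
    · intro hp
      rcases List.mem_cons.mp hp with h1 | h1
      · rw [h1]; exact List.mem_cons_self
      · exact h1
    · exact List.mem_cons_of_mem _
  have hmnitems : s.1 ∈ (PySem.Dict.ofList l : PySem.Dict Int Int).items := by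
    rw [hit]; exact (hdup _).mp hmnmem
  have hmxitems : s.2.1 ∈ (PySem.Dict.ofList l : PySem.Dict Int Int).items := by
    rw [hit]; exact (hdup _).mp hmxmem
  have hs1keys : s.1.1 ∈ (PySem.Dict.ofList l : PySem.Dict Int Int).keys :=
    (hkey_iff _).mpr ⟨s.1.2, hmnitems⟩
  have hs2keys : s.2.1.1 ∈ (PySem.Dict.ofList l : PySem.Dict Int Int).keys :=
    (hkey_iff _).mpr ⟨s.2.1.2, hmxitems⟩
  have hmn_eq : s.1.1 = k0 := by
    apply le_antisymm
    · obtain ⟨v, hv⟩ := (hkey_iff k0).mp ((hmemK k0).mp List.mem_cons_self)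
      rw [hit] at hv
      have := hmnle (k0, v) (List.mem_cons_of_mem _ hv)
      simpa using this
    · exact hmin _ hs1keys
  have hmx_eq : s.2.1.1 = (k0 :: kt).getLast hKne := by
    apply le_antisymm
    · exact hmax _ hs2keys
    · obtain ⟨v, hv⟩ := (hkey_iff ((k0 :: kt).getLast hKne)).mp ((hmemK _).mp (List.getLast_mem hKne))
      rw [hit] at hv
      have := hmxle ((k0 :: kt).getLast hKne, v) (List.mem_cons_of_mem _ hv)
      simpa using this
  have hvalmn : (PySem.Dict.ofList l : PySem.Dict Int Int).getD k0 0 = s.1.2 := by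
    rw [← hmn_eq]; exact hval _ hmnitems
  have hvalmx : (PySem.Dict.ofList l : PySem.Dict Int Int).getD ((k0 :: kt).getLast hKne) 0 = s.2.1.2 := by
    rw [← hmx_eq]; exact hval _ hmxitems
  -- unfold both ports
  simp only [get_bounding_box_1d, get_bounding_box_1d_alt, hit, hk,
    PySem.List.pyGet?_zero_cons, PySem.List.pyGet?_neg_one,
    List.getLast?_eq_some_getLast hKne, Option.getD_some, ← hs]
  rw [hmn_eq, hmx_eq]
  split_ifs with h1 h2
  · -- clamp left
    simp [hvalmn]
  · -- clamp right
    simp [hvalmx]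
  · -- interpolation branch
    have hk0x : k0 < x := not_le.mp h1
    have hxlast : x < (k0 :: kt).getLast hKne := not_le.mp h2
    -- predecessor exists
    obtain ⟨pp, hop'⟩ : ∃ pp, s.2.2.1 = some pp := by
      cases hopc : s.2.2.1 with
      | none =>
        exfalso
        rw [hopc] at hop
        simp only [InvPred] at hop
        obtain ⟨v, hv⟩ := (hkey_iff k0).mp ((hmemK k0).mp List.mem_cons_self)
        rw [hit] at hv
        exact hop (k0, v) hv (le_of_lt hk0x)
      | some pp => exact ⟨pp, rfl⟩
    obtain ⟨qq, hos'⟩ : ∃ qq, s.2.2.2 = some qq := by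
      cases hosc : s.2.2.2 with
      | none =>
        exfalso
        rw [hosc] at hos
        simp only [InvSucc] at hos
        obtain ⟨v, hv⟩ := (hkey_iff ((k0 :: kt).getLast hKne)).mp ((hmemK _).mp (List.getLast_mem hKne))
        rw [hit] at hv
        exact hos _ hv hxlast
      | some qq => exact ⟨qq, rfl⟩
    rw [hop'] at hop
    rw [hos'] at hos
    simp only [InvPred] at hop
    simp only [InvSucc] at hos
    obtain ⟨hpmem, hpx, hpmax⟩ := hop
    obtain ⟨hqmem, hqx, hqmin⟩ := hos
    have hppkeys : pp.1 ∈ (k0 :: kt : List Int) :=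
      (hmemK _).mpr ((hkey_iff _).mpr ⟨pp.2, by rw [hit]; exact hpmem⟩)
    have hqqkeys : qq.1 ∈ (k0 :: kt : List Int) :=
      (hmemK _).mpr ((hkey_iff _).mpr ⟨qq.2, by rw [hit]; exact hqmem⟩)
    -- A's x1
    obtain ⟨m, hm⟩ : ∃ m, PySem.List.max? ((k0 :: kt).filter (fun k => decide (k ≤ x))) (fun k : Int => k) = some m := by
      cases hmc : PySem.List.max? ((k0 :: kt).filter (fun k => decide (k ≤ x))) (fun k : Int => k) with
      | none =>
        exfalso
        have := (PySem.List.max?_eq_none_iff _ _).mp hmc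
        have hk0f : k0 ∈ (k0 :: kt).filter (fun k => decide (k ≤ x)) :=
          List.mem_filter.mpr ⟨List.mem_cons_self, by simp [le_of_lt hk0x]⟩
        rw [this] at hk0f
        simp at hk0f
      | some m => exact ⟨m, rfl⟩
    have hmf := List.mem_filter.mp (PySem.List.max?_mem hm)
    have hmK : m ∈ (k0 :: kt : List Int) := hmf.1
    have hmx' : m ≤ x := by simpa using hmf.2
    have hmmax : ∀ y ∈ (k0 :: kt : List Int), y ≤ x → y ≤ m := by
      intro y hy hyx
      exact PySem.List.max?_isMax hm y (List.mem_filter.mpr ⟨hy, by simpa⟩)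
    have hm_eq : m = pp.1 := by
      apply le_antisymm
      · obtain ⟨v, hv⟩ := (hkey_iff m).mp ((hmemK m).mp hmK)
        rw [hit] at hv
        exact hpmax (m, v) hv hmx'
      · exact hmmax pp.1 hppkeys hpx
    -- A's x2
    obtain ⟨m2, hm2⟩ : ∃ m2, PySem.List.min?
        ((k0 :: kt).filter (fun k => decide (x ≤ k) && decide (k ≠ m))) (fun k : Int => k) = some m2 := by
      cases hm2c : PySem.List.min? ((k0 :: kt).filter (fun k => decide (x ≤ k) && decide (k ≠ m))) (fun k : Int => k) with
      | none =>
        exfalso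
        have := (PySem.List.min?_eq_none_iff _ _).mp hm2c
        have hlf : (k0 :: kt).getLast hKne ∈ (k0 :: kt).filter (fun k => decide (x ≤ k) && decide (k ≠ m)) := by
          refine List.mem_filter.mpr ⟨List.getLast_mem hKne, ?_⟩
          have : m ≠ (k0 :: kt).getLast hKne := by
            intro he
            rw [he] at hmx'
            exact absurd hxlast (not_lt.mpr hmx')
          simp [le_of_lt hxlast, Ne.symm this]
        rw [this] at hlf
        simp at hlf
      | some m2 => exact ⟨m2, rfl⟩
    have hm2f := List.mem_filter.mp (PySem.List.min?_mem hm2)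
    have hm2K : m2 ∈ (k0 :: kt : List Int) := hm2f.1
    have hm2c : x ≤ m2 ∧ m2 ≠ m := by simpa using hm2f.2
    have hm2min : ∀ y ∈ (k0 :: kt : List Int), x ≤ y → y ≠ m → m2 ≤ y := by
      intro y hy hyx hym
      exact PySem.List.min?_isMin hm2 y (List.mem_filter.mpr ⟨hy, by simp [hyx, hym]⟩)
    have hxm2 : x < m2 := by
      rcases lt_or_eq_of_le hm2c.1 with hlt2 | heq
      · exact hlt2
      · exfalso
        have hle2 : m2 ≤ m := hmmax m2 hm2K (le_of_eq heq.symm)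
        have hne2 := hm2c.2
        omega
    have hm2_eq : m2 = qq.1 := by
      apply le_antisymm
      · refine hm2min qq.1 hqqkeys (le_of_lt hqx) ?_
        intro he
        rw [hm_eq] at he
        exact absurd (lt_of_le_of_lt hpx hqx) (by rw [he]; exact lt_irrefl _)
      · obtain ⟨v, hv⟩ := (hkey_iff m2).mp ((hmemK m2).mp hm2K)
        rw [hit] at hv
        exact hqmin (m2, v) hv hxm2
    rw [hop', hos']
    simp only [hm, hm2, Option.getD_some]
    have hvp : (PySem.Dict.ofList l : PySem.Dict Int Int).getD pp.1 0 = pp.2 :=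
      hval pp (by rw [hit]; exact hpmem)
    have hvq : (PySem.Dict.ofList l : PySem.Dict Int Int).getD qq.1 0 = qq.2 :=
      hval qq (by rw [hit]; exact hqmem)
    simp [hm_eq, hm2_eq, hvp, hvq]
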